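-- pv_equiv track=rewrite | github.com/krishnakumarbhat/plotly_code | simg_zmq/KPI/can_kpi/kpi/sil_radar_validation.py | _choose_dataset_path
-- ===== SOURCE A (Python) =====
-- from typing import Dict, Iterable, List, Mapping, Optional, Sequence, Tuple
--
-- def _leaf_name(path: str) -> str:
--     return path.split("/")[-1]
--
-- def _choose_dataset_path(all_paths: Sequence[str], preferred_leaf_names: Sequence[str]) -> Optional[str]:
--     leaf_to_paths: Dict[str, List[str]] = {}
--     for p in all_paths:
--         leaf_to_paths.setdefault(_leaf_name(p).lower(), []).append(p)
--
--     for pref in preferred_leaf_names: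
--         key = pref.lower()
--         if key in leaf_to_paths:
--             return sorted(leaf_to_paths[key], key=lambda s: (s.count("/"), len(s)))[0]
--     return None
-- ===== SOURCE B (Python) =====
-- from typing import Optional, Sequence
--
-- def _leaf_name(path: str) -> str:
--     return path.split("/")[-1]
--
-- def _choose_dataset_path(all_paths: Sequence[str], preferred_leaf_names: Sequence[str]) -> Optional[str]:
--     for pref in preferred_leaf_names:
--         key = pref.lower()
--         matches = [p for p in all_paths if _leaf_name(p).lower() == key]
--         if matches:
--             return min(matches, key=lambda s: (s.count("/"), len(s)))
--     return None
-- ===== Notes on version B (the rewrite author's own statement) =====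
-- stated objective: simpler
-- what changed: Dropped the leaf->paths index dict entirely: B loops over the preferred names, scans all_paths once per name collecting matches, and takes min(matches, key=...) instead of sorted(...)[0].
import Mathlib
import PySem

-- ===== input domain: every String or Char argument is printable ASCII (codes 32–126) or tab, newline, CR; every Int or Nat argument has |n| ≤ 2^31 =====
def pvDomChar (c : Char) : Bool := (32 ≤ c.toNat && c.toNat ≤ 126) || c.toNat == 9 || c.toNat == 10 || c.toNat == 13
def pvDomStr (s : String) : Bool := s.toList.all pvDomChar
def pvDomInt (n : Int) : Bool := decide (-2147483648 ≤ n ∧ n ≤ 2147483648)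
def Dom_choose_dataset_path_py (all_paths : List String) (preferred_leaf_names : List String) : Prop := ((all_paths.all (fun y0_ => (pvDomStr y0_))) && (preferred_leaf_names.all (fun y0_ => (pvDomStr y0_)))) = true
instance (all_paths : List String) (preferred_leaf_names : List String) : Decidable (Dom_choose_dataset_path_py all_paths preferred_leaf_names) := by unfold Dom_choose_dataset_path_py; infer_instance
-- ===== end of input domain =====

-- B drops A's leaf→paths index dict: it scans all_paths per preferred name and takes the first minimum
-- instead of building the index and sorting a bucket (objective: simpler).

-- shared helper: Python `_leaf_name(path) = path.split("/")[-1]` (both sources define it)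
def leaf_name_py (path : String) : String :=
  PySem.List.pyGetD ((PySem.Str.split? path "/").getD []) (-1) ""  -- "/" ≠ "": split? is always `some` here

-- ===== PORT A =====
-- the `for pref in preferred_leaf_names:` loop of A (d is the finished leaf_to_paths dict)
def chooseLoopA (d : PySem.Dict String (List String)) : List String → Option String
  | [] => none
  | pref :: rest =>
    let key := PySem.Str.lower pref
    if d.contains key then
      (PySem.List.sorted2 (d.getD key [])
        (fun s => PySem.Str.count s "/") (fun s => PySem.Str.len s)).head?
    else chooseLoopA d rest

def choose_dataset_path_py (all_paths : List String) (preferred_leaf_names : List String) : Option String :=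
  let d := all_paths.foldl
    (fun d p => d.modify (PySem.Str.lower (leaf_name_py p)) [] (fun v => v ++ [p]))
    PySem.Dict.empty
  chooseLoopA d preferred_leaf_names

-- ===== PORT B =====
def chooseLoopB (all_paths : List String) : List String → Option String
  | [] => none
  | pref :: rest =>
    let key := PySem.Str.lower pref
    let hits := all_paths.filter (fun p => PySem.Str.lower (leaf_name_py p) == key)
    if hits.isEmpty then chooseLoopB all_paths rest
    else
      PySem.List.min2? hits (fun s => PySem.Str.count s "/") (fun s => PySem.Str.len s)

def choose_dataset_path_py_alt (all_paths : List String) (preferred_leaf_names : List String) : Option String :=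
  chooseLoopB all_paths preferred_leaf_names

-- ===== PRECONDITION & SPEC =====
def Spec_choose_dataset_path_py (all_paths : List String) (preferred_leaf_names : List String) (out : Option String) : Prop := out = choose_dataset_path_py_alt all_paths preferred_leaf_names
instance (all_paths : List String) (preferred_leaf_names : List String) (out : Option String) : Decidable (Spec_choose_dataset_path_py all_paths preferred_leaf_names out) := by unfold Spec_choose_dataset_path_py; infer_instance

-- ===== CLAIM (what is proved, stated in full; the proofs are below) =====
def Claim_equal_choose_dataset_path_py : Prop := ∀ (all_paths : List String) (preferred_leaf_names : List String), Dom_choose_dataset_path_py all_paths preferred_leaf_names → Spec_choose_dataset_path_py all_paths preferred_leaf_names (choose_dataset_path_py all_paths preferred_leaf_names)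

-- ===== LEMMAS AND PROOFS =====

-- A's dict-build loop: what getD returns afterwards (via PySem.Dict.getD_foldl_modify_append)
theorem buildA_getD (l : List String) (c : String) :
    ((l.foldl (fun d p => d.modify (PySem.Str.lower (leaf_name_py p)) [] (fun v => v ++ [p]))
        PySem.Dict.empty).getD c [])
      = l.filter (fun p => PySem.Str.lower (leaf_name_py p) == c) := by
  have h := PySem.Dict.getD_foldl_modify_append
    (l.map (fun p => (PySem.Str.lower (leaf_name_py p), p))) PySem.Dict.empty c
  rw [List.foldl_map] at h
  simpa [List.filter_map, Function.comp_def] using h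

-- A's dict-build loop: membership afterwards
theorem buildA_contains (l : List String) (d : PySem.Dict String (List String)) (c : String) :
    ((l.foldl (fun d p => d.modify (PySem.Str.lower (leaf_name_py p)) [] (fun v => v ++ [p])) d).contains c)
      = (d.contains c || l.any (fun p => PySem.Str.lower (leaf_name_py p) == c)) := by
  induction l generalizing d with
  | nil => simp
  | cons p t ih =>
      simp [ih, PySem.Dict.contains_modify, BEq.comm]
      rw [Bool.or_assoc, Bool.or_left_comm]

theorem head?_insertBy {α : Type} (lt : α → α → Bool) (x : α) (l : List α) :
    (PySem.List.insertBy lt x l).head?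
      = some (match l with | [] => x | y :: _ => if lt x y then x else y) := by
  cases l with
  | nil => simp [PySem.List.insertBy]
  | cons y ys => simp [PySem.List.insertBy]; split <;> simp

theorem head?_foldl_insertBy {α : Type} (lt : α → α → Bool) (xs : List α) (acc : List α) :
    (xs.foldl (fun a x => PySem.List.insertBy lt x a) acc).head?
      = xs.foldl (fun a x => match a with
          | none => some x
          | some m => if lt x m then some x else some m) acc.head? := by
  induction xs generalizing acc with
  | nil => rfl
  | cons x t ih =>
      rw [List.foldl_cons, List.foldl_cons, ih, head?_insertBy]
      cases acc with
      | nil => rfl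
      | cons y ys => cases h : lt x y <;> simp [h]

-- the head of a stable lexicographic sort is Python's min with the same tuple key
theorem head?_sorted2_eq_min2? (xs : List String) :
    (PySem.List.sorted2 xs (fun s => PySem.Str.count s "/") (fun s => PySem.Str.len s)).head?
      = PySem.List.min2? xs (fun s => PySem.Str.count s "/") (fun s => PySem.Str.len s) := by
  rw [PySem.List.sorted2, PySem.List.min2?]
  simp only [if_neg (by decide : ¬ (false = true))]
  rw [head?_foldl_insertBy]
  rfl

theorem loops_agree (all_paths : List String) (prefs : List String) :
    chooseLoopA
      (all_paths.foldl
        (fun d p => d.modify (PySem.Str.lower (leaf_name_py p)) [] (fun v => v ++ [p]))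
        PySem.Dict.empty) prefs
      = chooseLoopB all_paths prefs := by
  induction prefs with
  | nil => rfl
  | cons pref rest ih =>
      rw [chooseLoopA, chooseLoopB]
      simp only [buildA_contains, PySem.Dict.contains_empty, Bool.false_or, buildA_getD,
        head?_sorted2_eq_min2?, List.isEmpty_iff, List.filter_eq_nil_iff]
      by_cases h : all_paths.any (fun p => PySem.Str.lower (leaf_name_py p) == PySem.Str.lower pref)
      · rw [if_pos h, if_neg]
        simp only [List.any_eq_true] at h
        obtain ⟨p, hp, hk⟩ := h
        exact fun hall => absurd hk (by simpa using hall p hp)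
      · rw [if_neg h, if_pos, ih]
        intro p hp
        simp only [List.any_eq_true, not_exists, not_and] at h
        simpa using h p hp

-- ===== VERDICT (by name: the statement is the Claim_ definition above) =====
theorem choose_dataset_path_py_spec : Claim_equal_choose_dataset_path_py := by
  intro all_paths prefs _dom
  unfold Spec_choose_dataset_path_py choose_dataset_path_py choose_dataset_path_py_alt
  exact loops_agree all_paths prefs
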